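-- pv_equiv track=rewrite | github.com/HyunJunLee-Hi/Coding_test | 22.10.03_백준.py | step4
-- ===== SOURCE A (Python) =====
-- def step4(fishbowl): #일렬로 만들기
--     h = len(fishbowl)
--     w = len(fishbowl[-1])
--     temp = []
--     for i in range(w):
--         for j in range(h):
--             try:
--                 temp.append(fishbowl[h-j-1][i])
--             except:
--                 pass
--
--     return temp
-- ===== SOURCE B (Python) =====
-- def step4(fishbowl):
--     w = len(fishbowl[-1])
--     cols = [[] for _ in range(w)]
--     for row in reversed(fishbowl):
--         for i in range(min(len(row), w)):
--             cols[i].append(row[i])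
--     return [x for col in cols for x in col]
-- ===== Notes on version B (the rewrite author's own statement) =====
-- stated objective: alternative
-- what changed: Replaced A's column-major double loop with try/except indexing by a single bottom-up row-major pass that distributes each row's entries into per-column buckets and flattens them; each cell is visited once with no per-cell exception handling.
import Mathlib
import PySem

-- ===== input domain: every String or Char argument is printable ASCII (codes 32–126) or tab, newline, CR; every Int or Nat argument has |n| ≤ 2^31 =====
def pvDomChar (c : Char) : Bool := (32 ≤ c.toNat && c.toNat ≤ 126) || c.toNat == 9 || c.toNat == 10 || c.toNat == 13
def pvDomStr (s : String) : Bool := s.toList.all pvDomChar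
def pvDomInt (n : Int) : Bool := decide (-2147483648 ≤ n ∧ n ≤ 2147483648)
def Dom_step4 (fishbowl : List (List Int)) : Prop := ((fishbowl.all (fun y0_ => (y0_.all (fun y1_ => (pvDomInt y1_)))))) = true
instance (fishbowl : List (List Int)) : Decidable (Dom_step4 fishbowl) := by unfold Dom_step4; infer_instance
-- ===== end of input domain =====

-- B flattens the grid column-wise bottom-up via per-column buckets filled in one row pass (A probes every (column,row) pair with try/except).

-- ===== PORT A =====
def step4 (fishbowl : List (List Int)) : List Int :=
  match PySem.List.pyGet? fishbowl (-1) with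
  | none => []   -- empty fishbowl: len(fishbowl[-1]) raises IndexError (excluded by Pre_)
  | some last =>
    let h : Int := fishbowl.length
    let w : Int := last.length
    (PySem.List.pyRange 0 w 1).foldl (fun temp i =>
      (PySem.List.pyRange 0 h 1).foldl (fun temp j =>
        -- try: temp.append(fishbowl[h-j-1][i]) except: pass
        match (PySem.List.pyGet? fishbowl (h - j - 1)).bind
                (fun row => PySem.List.pyGet? row i) with
        | none => temp
        | some v => temp ++ [v]) temp) []

-- ===== PORT B =====
def step4_alt (fishbowl : List (List Int)) : List Int :=
  match PySem.List.pyGet? fishbowl (-1) with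
  | none => []   -- empty fishbowl: len(fishbowl[-1]) raises IndexError (excluded by Pre_)
  | some last =>
    let w : Nat := last.length
    let cols : List (List Int) :=
      fishbowl.reverse.foldl
        (fun cols row =>
          -- for i in range(min(len(row), w)): cols[i].append(row[i])
          cols.mapIdx (fun i col =>
            match row[i]? with
            | some v => col ++ [v]
            | none => col))
        (List.replicate w ([] : List Int))
    cols.flatten

-- ===== PRECONDITION & SPEC =====
-- Pre_ excludes only the empty grid, on which A raises IndexError at fishbowl[-1].
def Pre_step4 (fishbowl : List (List Int)) : Prop := fishbowl ≠ []
instance (fishbowl : List (List Int)) : Decidable (Pre_step4 fishbowl) := by unfold Pre_step4; infer_instance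
def pvWitness_step4 : List (List Int) := [[1, 2], [3]]
def Spec_step4 (fishbowl : List (List Int)) (out : List Int) : Prop := out = step4_alt fishbowl
instance (fishbowl : List (List Int)) (out : List Int) : Decidable (Spec_step4 fishbowl out) := by unfold Spec_step4; infer_instance

-- ===== CLAIM (what is proved, stated in full; the proofs are below) =====
def Claim_equal_step4 : Prop := ∀ (fishbowl : List (List Int)), Dom_step4 fishbowl → Pre_step4 fishbowl → Spec_step4 fishbowl (step4 fishbowl)

-- ===== LEMMAS AND PROOFS =====

-- A's inner j-loop, rewritten as a fold over the reversed row list, collects exactly the existing entries of column i.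
theorem inner_fold_filterMap (rs : List (List Int)) (i : Int) (acc : List Int) :
    rs.foldl (fun t row => match PySem.List.pyGet? row i with
      | none => t
      | some v => t ++ [v]) acc
      = acc ++ rs.filterMap (fun row => PySem.List.pyGet? row i) := by
  induction rs generalizing acc with
  | nil => simp
  | cons r rs ih =>
    simp only [List.foldl_cons, List.filterMap_cons]
    cases h : PySem.List.pyGet? r i with
    | none => simp [ih]
    | some v => simp [ih]

-- B's bucket fold: each bucket i accumulates column i of the processed rows.
theorem bucket_fold (rs : List (List Int)) (cs : List (List Int)) :
    rs.foldl (fun cols row => cols.mapIdx (fun i col =>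
        match row[i]? with
        | some v => col ++ [v]
        | none => col)) cs
      = cs.mapIdx (fun i col => col ++ rs.filterMap (fun row => row[i]?)) := by
  induction rs generalizing cs with
  | nil =>
    apply List.ext_getElem
    · simp
    · intro k h1 h2; simp [List.getElem_mapIdx]
  | cons r rs ih =>
    simp only [List.foldl_cons, ih, List.mapIdx_mapIdx]
    apply List.ext_getElem
    · simp
    · intro k h1 h2
      simp only [List.getElem_mapIdx, Function.comp, List.filterMap_cons]
      cases h : cs[k]'(by simpa using h1) with
      | _ => cases hr : r[k]? <;> simp

-- A's j-loop over range(h) reads fb[h-j-1], i.e. walks fb in reverse.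
theorem inner_pyRange (fb : List (List Int)) (i : Int) (acc : List Int) :
    (PySem.List.pyRange 0 (fb.length : Int) 1).foldl (fun temp j =>
      match (PySem.List.pyGet? fb ((fb.length : Int) - j - 1)).bind
              (fun row => PySem.List.pyGet? row i) with
      | none => temp
      | some v => temp ++ [v]) acc
      = acc ++ fb.reverse.filterMap (fun row => PySem.List.pyGet? row i) := by
  have hrw : (PySem.List.pyRange 0 (fb.length : Int) 1).foldl (fun temp j =>
      match (PySem.List.pyGet? fb ((fb.length : Int) - j - 1)).bind
              (fun row => PySem.List.pyGet? row i) with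
      | none => temp
      | some v => temp ++ [v]) acc
      = (PySem.List.pyRange 0 (fb.reverse.length : Int) 1).foldl (fun temp j =>
          (fun t row => match PySem.List.pyGet? row i with
            | none => t
            | some v => t ++ [v]) temp (PySem.List.pyGetD fb.reverse j [])) acc := by
    rw [List.length_reverse]
    apply PySem.List.foldl_congr_mem
    intro acc j hj
    obtain ⟨hj0, hjlt⟩ := PySem.List.mem_pyRange_one.mp hj
    have e1 : (fb.length : Int) - j - 1 = ((fb.length - 1 - j.toNat : Nat) : Int) := by omega
    have ejn : j = ((j.toNat : Nat) : Int) := by omega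
    have hjr : fb.reverse[j.toNat]? = fb[fb.length - 1 - j.toNat]? :=
      List.getElem?_reverse (by omega)
    cases hsome : fb[fb.length - 1 - j.toNat]? with
    | none =>
      exfalso
      have := List.getElem?_eq_none_iff.mp hsome
      omega
    | some r =>
      rw [e1, PySem.List.pyGet?_natCast, hsome, ejn, PySem.List.pyGetD_natCast,
          List.getD_eq_getElem?_getD, hjr, hsome]
      rfl
  rw [hrw,
      PySem.List.foldl_pyRange_zero_pyGetD' fb.reverse ([] : List Int)
        (fun t row => match PySem.List.pyGet? row i with
          | none => t
          | some v => t ++ [v]) acc,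
      inner_fold_filterMap]

theorem mapIdx_replicate_append (n : Nat) (g : Nat → List Int) :
    (List.replicate n ([] : List Int)).mapIdx (fun i col => col ++ g i)
      = (List.range n).map g := by
  apply List.ext_getElem
  · simp
  · intro k h1 h2
    simp

-- ===== VERDICT (by name: the statement is the Claim_ definition above) =====
theorem step4_spec : Claim_equal_step4 := by
  intro fb _ hpre
  unfold Spec_step4 step4 step4_alt
  cases hlast : PySem.List.pyGet? fb (-1) with
  | none =>
    exfalso
    rw [PySem.List.pyGet?_neg_one] at hlast
    exact hpre (List.getLast?_eq_none_iff.mp hlast)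
  | some last =>
    simp only []
    rw [bucket_fold, mapIdx_replicate_append]
    have houter : ∀ (temp : List Int) (i : Int),
        (fun temp i =>
          (PySem.List.pyRange 0 (fb.length : Int) 1).foldl (fun temp j =>
            match (PySem.List.pyGet? fb ((fb.length : Int) - j - 1)).bind
                    (fun row => PySem.List.pyGet? row i) with
            | none => temp
            | some v => temp ++ [v]) temp) temp i
        = temp ++ fb.reverse.filterMap (fun row => PySem.List.pyGet? row i) :=
      fun temp i => inner_pyRange fb i temp
    rw [funext fun temp => funext fun i => houter temp i,
        PySem.List.foldl_append_eq_flatMap, PySem.List.pyRange_zero_nat,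
        List.flatMap_map, List.nil_append]
    simp [PySem.List.pyGet?_natCast, List.flatMap_def]
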